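-- pv_equiv track=rewrite | github.com/junbeom-Son/baekjoon | 백준/Gold/1918. 후위 표기식/후위 표기식.py | eliminatePlusAndMinus
-- ===== SOURCE A (Python) =====
-- def eliminatePlusAndMinus(expression):
--     newExpression = [expression[0]]
--     for i in range(1, len(expression)):
--         if expression[i] not in ['+', '-']:
--             operator = newExpression.pop()
--             newExpression.append(expression[i])
--             newExpression.append(operator)
--         else:
--             newExpression.append(expression[i])
--
--     return ''.join(newExpression)
-- ===== SOURCE B (Python) =====
-- def eliminatePlusAndMinus(expression):
--     top = expression[0]
--     out = []
--     for ch in expression[1:]: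
--         if ch in ('+', '-'):
--             out.append(top)
--             top = ch
--         else:
--             out.append(ch)
--     out.append(top)
--     return ''.join(out)
-- ===== Notes on version B (the rewrite author's own statement) =====
-- stated objective: simpler
-- what changed: Replaces the list-used-as-stack with pop/re-append swaps by a scalar 'held' variable (the first element or the latest +/-) and a plain output list, flushing the held element once after the loop.
import Mathlib
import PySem

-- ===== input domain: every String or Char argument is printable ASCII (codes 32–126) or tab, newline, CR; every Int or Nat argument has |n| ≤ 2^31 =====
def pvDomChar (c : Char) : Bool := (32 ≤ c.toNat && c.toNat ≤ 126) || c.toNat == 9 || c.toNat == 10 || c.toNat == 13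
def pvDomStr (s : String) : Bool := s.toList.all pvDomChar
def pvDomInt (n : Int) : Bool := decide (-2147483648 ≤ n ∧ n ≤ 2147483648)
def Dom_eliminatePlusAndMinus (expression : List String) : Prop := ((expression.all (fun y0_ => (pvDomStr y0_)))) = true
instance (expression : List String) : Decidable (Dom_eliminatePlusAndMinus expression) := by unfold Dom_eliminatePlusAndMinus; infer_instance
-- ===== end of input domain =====

-- B replaces A's stack-with-pop swaps by a scalar held element plus a plain output list (objective: simpler).

-- ===== PORT A =====
def eliminatePlusAndMinus (expression : List String) : String :=
  -- newExpression = [expression[0]]  (IndexError on [] is excluded by Pre_)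
  let init := (PySem.List.pyGet? expression 0).getD ""
  let newExpression := (expression.drop 1).foldl (fun ne s =>
      if ¬ (s = "+" ∨ s = "-") then
        match PySem.List.pop? ne (-1) with
        | some (operator, rest) => rest ++ [s, operator]
        | none => ne          -- unreachable: newExpression is never empty
      else ne ++ [s]) [init]
  PySem.Str.join "" newExpression

-- ===== PORT B =====
def eliminatePlusAndMinus_alt (expression : List String) : String :=
  let top0 := (PySem.List.pyGet? expression 0).getD ""   -- IndexError on [] is excluded by Pre_
  let r := (expression.drop 1).foldl (fun (p : List String × String) ch =>
      if ch = "+" ∨ ch = "-" then (p.1 ++ [p.2], ch) else (p.1 ++ [ch], p.2)) ([], top0)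
  PySem.Str.join "" (r.1 ++ [r.2])

-- ===== PRECONDITION & SPEC =====
-- Pre_ excludes only the empty list, on which A raises IndexError at expression[0].
def Pre_eliminatePlusAndMinus (expression : List String) : Prop := expression ≠ []
instance (expression : List String) : Decidable (Pre_eliminatePlusAndMinus expression) := by unfold Pre_eliminatePlusAndMinus; infer_instance
def pvWitness_eliminatePlusAndMinus : List String := ["1", "+", "23", "-", "4"]

def Spec_eliminatePlusAndMinus (expression : List String) (out : String) : Prop := out = eliminatePlusAndMinus_alt expression
instance (expression : List String) (out : String) : Decidable (Spec_eliminatePlusAndMinus expression out) := by unfold Spec_eliminatePlusAndMinus; infer_instance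

-- ===== CLAIM (what is proved, stated in full; the proofs are below) =====
def Claim_equal_eliminatePlusAndMinus : Prop := ∀ (expression : List String), Dom_eliminatePlusAndMinus expression → Pre_eliminatePlusAndMinus expression → Spec_eliminatePlusAndMinus expression (eliminatePlusAndMinus expression)

-- ===== LEMMAS AND PROOFS =====

-- A's stack is always B's output list with B's held element on top.
theorem pv_loop_eq (rest out : List String) (top : String) :
    rest.foldl (fun ne s =>
      if ¬ (s = "+" ∨ s = "-") then
        match PySem.List.pop? ne (-1) with
        | some (operator, r) => r ++ [s, operator]
        | none => ne
      else ne ++ [s]) (out ++ [top])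
    = (rest.foldl (fun (p : List String × String) ch =>
        if ch = "+" ∨ ch = "-" then (p.1 ++ [p.2], ch) else (p.1 ++ [ch], p.2)) (out, top)).1
      ++ [(rest.foldl (fun (p : List String × String) ch =>
        if ch = "+" ∨ ch = "-" then (p.1 ++ [p.2], ch) else (p.1 ++ [ch], p.2)) (out, top)).2] := by
  induction rest generalizing out top with
  | nil => simp
  | cons s rest ih =>
      simp only [List.foldl_cons]
      by_cases h : s = "+" ∨ s = "-"
      · simp only [h, not_true, not_false_iff, if_neg, if_pos]
        exact ih (out ++ [top]) s
      · rw [if_pos (by simpa using h), if_neg h, PySem.List.pop?_last]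
        simpa [List.append_assoc] using ih (out ++ [s]) top

-- ===== VERDICT (by name: the statement is the Claim_ definition above) =====
theorem eliminatePlusAndMinus_spec : Claim_equal_eliminatePlusAndMinus := by
  intro expression _ hpre
  unfold Spec_eliminatePlusAndMinus eliminatePlusAndMinus eliminatePlusAndMinus_alt
  cases expression with
  | nil => exact absurd rfl hpre
  | cons e0 rest =>
      simp only [List.drop_succ_cons, List.drop_zero]
      have := pv_loop_eq rest [] ((PySem.List.pyGet? (e0 :: rest) 0).getD "")
      simp only [List.nil_append] at this
      rw [this]
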